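-- pv_equiv track=rewrite | github.com/ChenF221/Teoria-de-la-computacion | Bloque_2/Programa 5 Backus-Naur condicional IF/if.py | convertir_a_pseudocodigo
-- ===== SOURCE A (Python) =====
-- def convertir_a_pseudocodigo(expression):
--
--     expression = expression[1:-1]  # Eliminar los paréntesis externos
--     def parse_expression(expr, indent=0):
--         result = ""
--
--         while expr:
--             char = expr[0]
--             expr = expr[1:]
--
--             if char == 'i':  # if
--                 result += " " * indent + "if (cond) then\n"
--                 result += " " * indent + "{\n"
--                 nested, expr = parse_expression(expr, indent + 4)
--                 result += nested
--                 result += " " * indent + "}\n"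
--             elif char == 'A':  # then
--                 pass
--             elif char == 'S':  # statement
--                 result += " " * indent + "statement\n"
--                 break
--             elif char == ';':  # else starts
--                 result += " " * indent + "else\n"
--                 result += " " * indent + "{\n"
--                 nested, expr = parse_expression(expr, indent + 4)
--                 result += nested
--                 result += " " * indent + "}\n"
--             elif char == ')':  # end of a block
--                 indent -= 4
--                 break
--
--         return result, expr
--
--     pseudocode, _ = parse_expression(expression)
--     return pseudocode
-- ===== SOURCE B (Python) =====
-- def convertir_a_pseudocodigo(expression):
--     # Iterative one-pass scan with an explicit stack of indent levels
--     # instead of A's recursive-descent with string concatenation.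
--     out = []
--     stack = []
--     indent = 0
--     for ch in expression[1:-1]:
--         if ch == 'i' or ch == ';':
--             pad = " " * indent
--             head = "if (cond) then\n" if ch == 'i' else "else\n"
--             out.append(pad + head + pad + "{\n")
--             stack.append(indent)
--             indent += 4
--         elif ch == 'S':
--             out.append(" " * indent + "statement\n")
--             if not stack:
--                 break  # top-level statement ends the parse
--             indent = stack.pop()
--             out.append(" " * indent + "}\n")
--         elif ch == ')':
--             if not stack:
--                 break  # top-level close ends the parse
--             indent = stack.pop()
--             out.append(" " * indent + "}\n")
--     else:
--         while stack:  # end of input: close every open block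
--             out.append(" " * stack.pop() + "}\n")
--     return "".join(out)
-- ===== Notes on version B (the rewrite author's own statement) =====
-- stated objective: faster
-- what changed: Replaces A's recursive-descent parser (while-loop with recursive calls and repeated string concatenation of nested results) by a single left-to-right scan maintaining an explicit stack of indent levels and a list of output pieces joined once at the end.
import Mathlib
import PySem

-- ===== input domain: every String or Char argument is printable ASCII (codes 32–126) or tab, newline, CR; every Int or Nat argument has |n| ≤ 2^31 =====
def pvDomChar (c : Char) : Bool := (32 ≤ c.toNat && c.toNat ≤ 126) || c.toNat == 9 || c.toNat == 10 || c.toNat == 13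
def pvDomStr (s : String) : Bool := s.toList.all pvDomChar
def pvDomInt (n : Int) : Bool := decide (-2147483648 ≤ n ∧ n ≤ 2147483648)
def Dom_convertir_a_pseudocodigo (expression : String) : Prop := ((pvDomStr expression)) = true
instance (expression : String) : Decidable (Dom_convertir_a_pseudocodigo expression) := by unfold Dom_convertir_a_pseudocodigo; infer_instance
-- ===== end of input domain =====

-- B replaces A's recursive descent with repeated string concatenation by a single iterative
-- scan with an explicit stack of indent levels and one final join (measured faster by the
-- timing run); return values proved equal on all inputs.

-- ===== PORT A =====
-- " " * indent
def padA (indent : Nat) : List Char := List.replicate indent ' '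

-- parse_expression: while-loop-with-recursion transcribed as recursion; the result carries
-- the proof that the leftover suffix is no longer than the input (for termination only).
-- indent is a Nat: every call site passes 0 or indent+4, and the ')' branch's 'indent -= 4'
-- is dead (indent is local and the loop breaks), so no negative value is ever used.
def parseA : (expr : List Char) → (indent : Nat) → {p : List Char × List Char // p.2.length ≤ expr.length}
  | [], _ => ⟨([], []), by simp⟩
  | c :: rest, indent =>
    if c = 'i' then
      match parseA rest (indent + 4) with
      | ⟨(nested, exprA), hn⟩ =>
        match parseA exprA indent with
        | ⟨(tail, exprB), ht⟩ =>
          ⟨(padA indent ++ "if (cond) then\n".toList ++ padA indent ++ "{\n".toList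
              ++ nested ++ padA indent ++ "}\n".toList ++ tail, exprB),
            by simp at hn ht ⊢; omega⟩
    else if c = 'A' then
      match parseA rest indent with
      | ⟨p, hp⟩ => ⟨p, by simp; omega⟩
    else if c = 'S' then
      ⟨(padA indent ++ "statement\n".toList, rest), by simp⟩
    else if c = ';' then
      match parseA rest (indent + 4) with
      | ⟨(nested, exprA), hn⟩ =>
        match parseA exprA indent with
        | ⟨(tail, exprB), ht⟩ =>
          ⟨(padA indent ++ "else\n".toList ++ padA indent ++ "{\n".toList
              ++ nested ++ padA indent ++ "}\n".toList ++ tail, exprB),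
            by simp at hn ht ⊢; omega⟩
    else if c = ')' then
      ⟨([], rest), by simp⟩  -- 'indent -= 4' then break: the decremented local is discarded
    else
      -- any other character: no branch fires, the loop just continues
      match parseA rest indent with
      | ⟨p, hp⟩ => ⟨p, by simp; omega⟩
termination_by expr _ => expr.length
decreasing_by all_goals (simp at *; try omega)

def convertir_a_pseudocodigo (expression : String) : String :=
  String.ofList (parseA (PySem.List.slice expression.toList (some 1) (some (-1))) 0).1.1

-- ===== PORT B =====
def padB (indent : Nat) : List Char := List.replicate indent ' '

-- end of input: pop and close every still-open block
def drainB : List Nat → List Char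
  | [] => []
  | d :: st => padB d ++ "}\n".toList ++ drainB st

-- one left-to-right pass; stack holds the indent level of each open block
def loopB : List Char → List Nat → Nat → List Char → List Char
  | [], stack, _, acc => acc ++ drainB stack
  | c :: rest, stack, indent, acc =>
    if c = 'i' ∨ c = ';' then
      loopB rest (indent :: stack) (indent + 4)
        (acc ++ padB indent
             ++ (if c = 'i' then "if (cond) then\n".toList else "else\n".toList)
             ++ padB indent ++ "{\n".toList)
    else if c = 'S' then
      match stack with
      | [] => acc ++ padB indent ++ "statement\n".toList  -- top-level statement ends the parse
      | d :: st => loopB rest st d (acc ++ padB indent ++ "statement\n".toList ++ padB d ++ "}\n".toList)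
    else if c = ')' then
      match stack with
      | [] => acc  -- top-level close ends the parse
      | d :: st => loopB rest st d (acc ++ padB d ++ "}\n".toList)
    else
      loopB rest stack indent acc

def convertir_a_pseudocodigo_alt (expression : String) : String :=
  String.ofList (loopB (PySem.List.slice expression.toList (some 1) (some (-1))) [] 0 [])

-- ===== PRECONDITION & SPEC =====
def Spec_convertir_a_pseudocodigo (expression : String) (out : String) : Prop := out = convertir_a_pseudocodigo_alt expression
instance (expression : String) (out : String) : Decidable (Spec_convertir_a_pseudocodigo expression out) := by unfold Spec_convertir_a_pseudocodigo; infer_instance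

-- ===== CLAIM (what is proved, stated in full; the proofs are below) =====
def Claim_equal_convertir_a_pseudocodigo : Prop := ∀ (expression : String), Dom_convertir_a_pseudocodigo expression → Spec_convertir_a_pseudocodigo expression (convertir_a_pseudocodigo expression)

-- ===== LEMMAS AND PROOFS =====

-- the text A's caller frames emit once the current frame returns leftover `rest`:
-- each pending frame closes its block at its own indent and resumes its while-loop
def contA : List Nat → List Char → List Char
  | [], _ => []
  | d :: st, rest =>
    padA d ++ "}\n".toList ++ (parseA rest d).1.1 ++ contA st (parseA rest d).1.2

theorem padB_eq_padA (n : Nat) : padB n = padA n := rfl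

theorem contA_nil (st : List Nat) : contA st [] = drainB st := by
  induction st with
  | nil => rfl
  | cons d st ih => simp [contA, drainB, parseA, ih, padB_eq_padA]

theorem parseA_S (rest : List Char) (indent : Nat) :
    (parseA ('S' :: rest) indent).1 = (padA indent ++ "statement\n".toList, rest) := by
  simp [parseA]

theorem parseA_close (rest : List Char) (indent : Nat) :
    (parseA (')' :: rest) indent).1 = ([], rest) := by
  simp [parseA]

theorem loopB_eq_parseA (expr : List Char) :
    ∀ (stack : List Nat) (indent : Nat) (acc : List Char),
      loopB expr stack indent acc
        = acc ++ (parseA expr indent).1.1 ++ contA stack (parseA expr indent).1.2 := by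
  induction expr with
  | nil => intro stack indent acc; simp [loopB, parseA, contA_nil]
  | cons c rest ih =>
    intro stack indent acc
    by_cases hi : c = 'i'
    · simp [loopB, parseA, hi, ih, contA, padB_eq_padA]
    · by_cases hA : c = 'A'
      · simp [loopB, parseA, hi, hA, ih]
      · by_cases hS : c = 'S'
        · cases stack with
          | nil => simp [loopB, parseA, hi, hA, hS, contA, padB_eq_padA]
          | cons d st => subst hS; rw [parseA_S]; simp [loopB, ih, contA, padB_eq_padA]
        · by_cases he : c = ';'
          · simp [loopB, parseA, hi, hA, hS, he, ih, contA, padB_eq_padA]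
          · by_cases hp : c = ')'
            · cases stack with
              | nil => simp [loopB, parseA, hi, hA, hS, he, hp, contA, padB_eq_padA]
              | cons d st => subst hp; rw [parseA_close]; simp [loopB, hi, hA, hS, he, ih, contA, padB_eq_padA]
            · simp [loopB, parseA, hi, hA, hS, he, hp, ih]

-- ===== VERDICT (by name: the statement is the Claim_ definition above) =====
theorem convertir_a_pseudocodigo_spec : Claim_equal_convertir_a_pseudocodigo := by
  intro expression _
  unfold Spec_convertir_a_pseudocodigo convertir_a_pseudocodigo convertir_a_pseudocodigo_alt
  rw [loopB_eq_parseA]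
  simp [contA]
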